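-- pv_equiv track=rewrite | github.com/MichaelTroelsen/SIDM2conv | sidm2/disasm_table_finder.py | cluster_addresses
-- ===== SOURCE A (Python) =====
-- from typing import Dict, List, Tuple, Set
--
-- def cluster_addresses(addresses: List[int], max_gap: int = 32) -> List[Tuple[int, int]]:
--     """Cluster addresses into contiguous regions.
--
--     Args:
--         addresses: List of addresses
--         max_gap: Maximum gap between addresses to consider them in same cluster
--
--     Returns:
--         List of (start_addr, end_addr) tuples
--     """
--     if not addresses:
--         return []
--
--     addresses = sorted(addresses)
--     clusters = []
--     start = addresses[0]
--     prev = addresses[0]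
--
--     for addr in addresses[1:]:
--         if addr - prev > max_gap:
--             # Start new cluster
--             clusters.append((start, prev))
--             start = addr
--         prev = addr
--
--     # Add final cluster
--     clusters.append((start, prev))
--
--     return clusters
-- ===== SOURCE B (Python) =====
-- def cluster_addresses(addresses, max_gap=32):
--     """Staged decomposition: compute all break indices first, then slice the
--     sorted list into boundary-delimited segments and project each to its ends."""
--     xs = sorted(addresses)
--     n = len(xs)
--     if n == 0:
--         return []
--     cuts = [i for i in range(1, n) if xs[i] - xs[i - 1] > max_gap]
--     bounds = [0] + cuts + [n]
--     segments = [xs[a:b] for a, b in zip(bounds, bounds[1:])]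
--     return [(seg[0], seg[-1]) for seg in segments]
-- ===== Notes on version B (the rewrite author's own statement) =====
-- stated objective: alternative
-- what changed: Replaces A's single running start/prev accumulator loop by a staged pipeline: first compute the list of all break indices over range(1,n), then build the boundary list (zero, the cuts, n), slice the sorted list into contiguous segments between consecutive boundaries, and project each segment to its first and last element.
import Mathlib
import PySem

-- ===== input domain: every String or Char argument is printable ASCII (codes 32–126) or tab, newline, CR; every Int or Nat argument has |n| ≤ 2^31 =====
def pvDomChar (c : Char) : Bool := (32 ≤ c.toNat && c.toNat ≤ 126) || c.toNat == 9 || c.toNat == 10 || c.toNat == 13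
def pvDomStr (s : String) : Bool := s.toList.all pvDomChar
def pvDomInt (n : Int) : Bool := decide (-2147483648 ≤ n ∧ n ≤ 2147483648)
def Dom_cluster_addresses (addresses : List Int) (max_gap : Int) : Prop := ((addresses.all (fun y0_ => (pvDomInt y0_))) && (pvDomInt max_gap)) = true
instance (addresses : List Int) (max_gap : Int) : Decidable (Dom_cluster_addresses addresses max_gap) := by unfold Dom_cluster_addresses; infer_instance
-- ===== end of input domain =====

-- B replaces A's running start/prev accumulator loop by a staged pipeline: all break
-- indices first, then the boundary list, then slicing into segments; objective: alternative.


-- ===== PORT A =====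
-- literal transliteration of A: sort, then one loop over addresses[1:] carrying
-- (clusters, start, prev), appending the final cluster at the end
def cluster_addresses (addresses : List Int) (max_gap : Int) : List (Int × Int) :=
  if addresses = [] then []
  else
    match PySem.List.sorted addresses (fun x => x) false with
    | [] => []   -- unreachable: sorted of a nonempty list is nonempty
    | a0 :: rest =>
      let st := rest.foldl
        (fun (s : List (Int × Int) × Int × Int) addr =>
          let (clusters, start, prev) := s
          if addr - prev > max_gap then (clusters ++ [(start, prev)], addr, addr)
          else (clusters, start, addr))
        ([], a0, a0)
      st.1 ++ [(st.2.1, st.2.2)]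

-- ===== PORT B =====
-- literal transliteration of B (Source B): cuts = break indices over range(1, n);
-- bounds = [0] + cuts + [n]; segments = xs[a:b] for (a, b) in zip(bounds, bounds[1:]);
-- result = (seg[0], seg[-1]) per segment.  xs[i]/seg[i] is ported as pyGetD (every
-- index is provably in range, so Python's indexing never raises and pyGetD is exact).
def cluster_addresses_alt (addresses : List Int) (max_gap : Int) : List (Int × Int) :=
  let xs := PySem.List.sorted addresses (fun x => x) false
  let n : Int := xs.length
  if n = 0 then []
  else
    let cuts := (PySem.List.pyRange 1 n 1).filter
      (fun i => decide (PySem.List.pyGetD xs i 0 - PySem.List.pyGetD xs (i - 1) 0 > max_gap))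
    let bounds := (0 : Int) :: (cuts ++ [n])
    let segments := (List.zip bounds (PySem.List.slice bounds (some 1) none)).map
      (fun p => PySem.List.slice xs (some p.1) (some p.2))
    segments.map (fun seg => (PySem.List.pyGetD seg 0 0, PySem.List.pyGetD seg (-1) 0))

-- ===== PRECONDITION & SPEC =====
def Spec_cluster_addresses (addresses : List Int) (max_gap : Int) (out : List (Int × Int)) : Prop := out = cluster_addresses_alt addresses max_gap
instance (addresses : List Int) (max_gap : Int) (out : List (Int × Int)) : Decidable (Spec_cluster_addresses addresses max_gap out) := by unfold Spec_cluster_addresses; infer_instance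

-- ===== CLAIM (what is proved, stated in full; the proofs are below) =====
def Claim_equal_cluster_addresses : Prop := ∀ (addresses : List Int) (max_gap : Int), Dom_cluster_addresses addresses max_gap → Spec_cluster_addresses addresses max_gap (cluster_addresses addresses max_gap)

-- ===== LEMMAS AND PROOFS =====

-- Recursive description of A's loop tail: the clusters still to be emitted given (start, prev).
def clustTail (max_gap : Int) : List Int → Int → Int → List (Int × Int)
  | [], start, prev => [(start, prev)]
  | a :: t, start, prev =>
      if a - prev > max_gap then (start, prev) :: clustTail max_gap t a a
      else clustTail max_gap t start a

-- Recursive description of B's cut list: the break indices inside prev :: ys, the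
-- first element of ys having (global) index i.
def cutsR (max_gap : Int) : List Int → Int → Int → List Int
  | [], _, _ => []
  | a :: t, prev, i =>
      if a - prev > max_gap then i :: cutsR max_gap t a (i + 1)
      else cutsR max_gap t a (i + 1)

-- A's foldl with an accumulated clusters list equals the accumulator ++ clustTail.
theorem foldl_eq_clustTail (max_gap : Int) :
    ∀ (ys : List Int) (c : List (Int × Int)) (s p : Int),
      (ys.foldl
        (fun (st : List (Int × Int) × Int × Int) addr =>
          let (clusters, start, prev) := st
          if addr - prev > max_gap then (clusters ++ [(start, prev)], addr, addr)
          else (clusters, start, addr))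
        (c, s, p)).1
      ++ [((ys.foldl
        (fun (st : List (Int × Int) × Int × Int) addr =>
          let (clusters, start, prev) := st
          if addr - prev > max_gap then (clusters ++ [(start, prev)], addr, addr)
          else (clusters, start, addr))
        (c, s, p)).2.1,
        (ys.foldl
        (fun (st : List (Int × Int) × Int × Int) addr =>
          let (clusters, start, prev) := st
          if addr - prev > max_gap then (clusters ++ [(start, prev)], addr, addr)
          else (clusters, start, addr))
        (c, s, p)).2.2)]
      = c ++ clustTail max_gap ys s p := by
  intro ys
  induction ys with
  | nil => intro c s p; simp [clustTail]
  | cons a t ih =>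
      intro c s p
      by_cases h : a - p > max_gap
      · simp only [List.foldl_cons, clustTail, if_pos h]
        rw [ih]
        simp
      · simp only [List.foldl_cons, clustTail, if_neg h]
        rw [ih]

-- The element at the start of a suffix.
theorem getD_of_drop_cons (xs : List Int) (j : Nat) (p : Int) (ys : List Int)
    (h : xs.drop j = p :: ys) : xs.getD j 0 = p := by
  have h0 : (List.drop j xs)[0]? = xs[j + 0]? := List.getElem?_drop
  rw [h] at h0
  simp only [List.getElem?_cons_zero, Nat.add_zero] at h0
  simp [List.getD, ← h0]

-- Dropping one more element of a suffix.
theorem drop_succ_of_drop_cons (xs : List Int) (j : Nat) (p : Int) (ys : List Int)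
    (h : xs.drop j = p :: ys) : xs.drop (j + 1) = ys := by
  rw [← List.tail_drop, h]
  rfl

-- Length of a list with a known suffix.
theorem len_of_drop_cons (xs : List Int) (j : Nat) (p : Int) (ys : List Int)
    (h : xs.drop j = p :: ys) : xs.length = j + 1 + ys.length := by
  have hl := congrArg List.length h
  simp [List.length_drop] at hl
  omega

-- First element of a nonempty take-of-drop segment.
theorem seg_head (xs : List Int) (b m : Nat) (hb : b < xs.length) (hm : 0 < m) :
    PySem.List.pyGetD ((xs.drop b).take m) 0 0 = xs.getD b 0 := by
  rw [PySem.List.pyGetD_zero]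
  have h1 : ((xs.drop b).take m)[0]? = (xs.drop b)[0]? := by
    rw [List.getElem?_take_of_lt hm]
  have h2 : (List.drop b xs)[0]? = xs[b + 0]? := List.getElem?_drop
  simp only [Nat.add_zero] at h2
  simp [List.getD, h1, h2]

-- Last element of a nonempty take-of-drop segment that stays inside the list.
theorem seg_last (xs : List Int) (b m : Nat) (hm : 0 < m) (hbm : b + m ≤ xs.length) :
    PySem.List.pyGetD ((xs.drop b).take m) (-1) 0 = xs.getD (b + m - 1) 0 := by
  have hlen : ((xs.drop b).take m).length = m := by
    simp [List.length_take, List.length_drop]; omega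
  have hne : (xs.drop b).take m ≠ [] := by
    intro hnil; rw [hnil] at hlen; simp at hlen; omega
  rw [PySem.List.pyGetD_neg_one _ _ hne]
  rw [List.getLast_eq_getElem]
  have h2 : m - 1 < (xs.drop b).length := by simp [List.length_drop]; omega
  rw [List.getElem_take, List.getElem_drop]
  have h3 : xs.getD (b + m - 1) 0 = xs[b + m - 1] := List.getD_eq_getElem xs 0 (by omega)
  rw [h3]
  congr 1
  simp [hlen]
  omega

-- B's filtered range equals cutsR, read off the suffix of xs starting at j.
theorem filter_pyRange_eq_cutsR (max_gap : Int) (xs : List Int) :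
    ∀ (ys : List Int) (prev : Int) (j : Nat), xs.drop j = prev :: ys →
      (PySem.List.pyRange ((j : Int) + 1) (xs.length : Int) 1).filter
        (fun i => decide (PySem.List.pyGetD xs i 0 - PySem.List.pyGetD xs (i - 1) 0 > max_gap))
      = cutsR max_gap ys prev ((j : Int) + 1) := by
  intro ys
  induction ys with
  | nil =>
      intro prev j hdrop
      have hlen := len_of_drop_cons xs j prev [] hdrop
      rw [PySem.List.pyRange_one_eq_nil (by simp at hlen; omega)]
      simp [cutsR]
  | cons a t ih =>
      intro prev j hdrop
      have hlen := len_of_drop_cons xs j prev (a :: t) hdrop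
      have hdrop1 := drop_succ_of_drop_cons xs j prev (a :: t) hdrop
      have hgj := getD_of_drop_cons xs j prev (a :: t) hdrop
      have hgj1 := getD_of_drop_cons xs (j + 1) a t hdrop1
      have hj1 : j + 1 < xs.length := by simp at hlen; omega
      rw [PySem.List.pyRange_one_cons (by exact_mod_cast hj1)]
      rw [List.filter_cons]
      have hc1 : PySem.List.pyGetD xs ((j : Int) + 1) 0 = a := by
        have h : ((j : Int) + 1) = ((j + 1 : Nat) : Int) := by push_cast; ring
        rw [h, PySem.List.pyGetD_natCast]
        simpa using hgj1
      have hc2 : PySem.List.pyGetD xs ((j : Int) + 1 - 1) 0 = prev := by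
        have h : ((j : Int) + 1 - 1) = ((j : Nat) : Int) := by ring
        rw [h, PySem.List.pyGetD_natCast]
        simpa using hgj
      have hcast : ((j : Int) + 1) + 1 = ((j + 1 : Nat) : Int) + 1 := by push_cast; ring
      have hih := ih a (j + 1) hdrop1
      by_cases h : a - prev > max_gap
      · rw [if_pos (by rw [hc1, hc2]; exact decide_eq_true h)]
        rw [hcast, hih]
        simp [cutsR, if_pos h]
      · rw [if_neg (by rw [hc1, hc2]; simpa using h)]
        rw [hcast, hih]
        simp [cutsR, if_neg h]

-- The zipped boundary walk over cutsR equals clustTail: consecutive boundaries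
-- (u, v) contribute the pair (xs[u], xs[v-1]).
theorem zip_bounds_eq_clustTail (max_gap : Int) (xs : List Int) :
    ∀ (ys : List Int) (prev : Int) (j b : Nat), b ≤ j → xs.drop j = prev :: ys →
      (List.zip ((b : Int) :: (cutsR max_gap ys prev ((j : Int) + 1) ++ [(xs.length : Int)]))
                (cutsR max_gap ys prev ((j : Int) + 1) ++ [(xs.length : Int)])).map
        (fun p => (PySem.List.pyGetD (PySem.List.slice xs (some p.1) (some p.2)) 0 0,
                   PySem.List.pyGetD (PySem.List.slice xs (some p.1) (some p.2)) (-1) 0))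
      = clustTail max_gap ys (xs.getD b 0) prev := by
  intro ys
  induction ys with
  | nil =>
      intro prev j b hb hdrop
      have hlen := len_of_drop_cons xs j prev [] hdrop
      have hgj := getD_of_drop_cons xs j prev [] hdrop
      simp only [List.length_nil] at hlen
      simp only [cutsR, List.nil_append, List.zip_cons_cons, List.zip_nil_right,
        List.map_cons, List.map_nil, clustTail]
      rw [PySem.List.slice_natCast]
      rw [seg_head xs b (xs.length - b) (by omega) (by omega)]
      rw [seg_last xs b (xs.length - b) (by omega) (by omega)]
      have h : b + (xs.length - b) - 1 = j := by omega
      rw [h, hgj]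
  | cons a t ih =>
      intro prev j b hb hdrop
      have hlen := len_of_drop_cons xs j prev (a :: t) hdrop
      have hdrop1 := drop_succ_of_drop_cons xs j prev (a :: t) hdrop
      have hgj := getD_of_drop_cons xs j prev (a :: t) hdrop
      have hgj1 := getD_of_drop_cons xs (j + 1) a t hdrop1
      have hj1 : j + 1 < xs.length := by simp at hlen; omega
      have hcast : ((j : Int) + 1) = ((j + 1 : Nat) : Int) := by push_cast; ring
      by_cases h : a - prev > max_gap
      · have hih := ih a (j + 1) (j + 1) (le_refl _) hdrop1
        simp only [cutsR, if_pos h, List.cons_append, List.zip_cons_cons, List.map_cons,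
          clustTail]
        rw [hcast]
        rw [hih, hgj1]
        rw [PySem.List.slice_natCast]
        rw [seg_head xs b (j + 1 - b) (by omega) (by omega)]
        rw [seg_last xs b (j + 1 - b) (by omega) (by omega)]
        have hidx : b + (j + 1 - b) - 1 = j := by omega
        rw [hidx, hgj]
      · have hih := ih a (j + 1) b (by omega) hdrop1
        simp only [cutsR, if_neg h, clustTail]
        rw [hcast]
        exact hih

-- ===== VERDICT (by name: the statement is the Claim_ definition above) =====
theorem cluster_addresses_spec : Claim_equal_cluster_addresses := by
  intro addresses max_gap _
  unfold Spec_cluster_addresses cluster_addresses cluster_addresses_alt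
  by_cases hne : addresses = []
  · simp [hne, PySem.List.sorted]
  · simp only [if_neg hne]
    cases hs : PySem.List.sorted addresses (fun x => x) false with
    | nil =>
        have hp := congrArg List.length hs
        rw [PySem.List.length_sorted] at hp
        simp at hp
        exact absurd hp hne
    | cons a0 rest =>
        simp only []
        rw [foldl_eq_clustTail, List.nil_append]
        have hlen0 : ¬ (((a0 :: rest).length : Int) = 0) := by
          simp only [List.length_cons]
          push_cast
          omega
        rw [if_neg hlen0]
        have hdrop0 : (a0 :: rest).drop 0 = a0 :: rest := rfl
        have hcuts := filter_pyRange_eq_cutsR max_gap (a0 :: rest) rest a0 0 hdrop0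
        have hzip := zip_bounds_eq_clustTail max_gap (a0 :: rest) rest a0 0 0 (le_refl _) hdrop0
        simp only [Nat.cast_zero, zero_add] at hcuts hzip
        rw [PySem.List.slice_from_one]
        simp only [List.tail_cons]
        rw [hcuts]
        simp only [List.map_map, Function.comp_def]
        rw [hzip]
        simp [List.getD]
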